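-- pv_equiv track=rewrite | github.com/rajatdiptabiswas/competitive-programming | CodeChef/MINVOTE.py | search_left
-- ===== SOURCE A (Python) =====
-- def sum_in_between(i, j, prefix):
-- 	l = min(i, j)
-- 	r = max(i, j)
--
-- 	return prefix[r-1] - prefix[l]
--
-- def search_left(left, right, index, array, prefix):
-- 	mid = (left + right) // 2
--
-- 	if right == left:
-- 		return right
--
-- 	if right == left + 1:
-- 		if sum_in_between(right, index, prefix) <= array[index]:
-- 			if sum_in_between(left, index, prefix) <= array[index]:
-- 				return left
-- 			else:
-- 				return right
--
-- 	if sum_in_between(index, mid, prefix) <= array[index]: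
-- 		return search_left(left, mid, index, array, prefix)
--
-- 	else:
-- 		return search_left(mid + 1, right, index, array, prefix)
-- ===== SOURCE B (Python) =====
-- def search_left(left, right, index, array, prefix):
--     # lo/width window representation instead of A's recursive [left,right] search
--     if right == left:
--         return right
--     a = array[index]
--
--     def ok(j):
--         # sum of array elements strictly between positions index and j is <= a
--         if j >= index:
--             return prefix[j - 1] - prefix[index] <= a
--         return prefix[index - 1] - prefix[j] <= a
--
--     lo, width = left, right - left
--     while width > 1:
--         half = width // 2
--         if ok(lo + half):
--             width = half
--         else:
--             lo += half + 1
--             width -= half + 1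
--     if width == 1 and not ok(lo):
--         return lo + 1
--     return lo
-- ===== Notes on version B (the rewrite author's own statement) =====
-- stated objective: alternative
-- what changed: Replaced A's recursive binary search on a closed window [left,right] (with min/max prefix-difference helper and a nested two-element special case that can fall through into a recursive step) by an iterative loop over a lo/width window representation with a branch-on-side predicate helper, resolving the final one- or zero-element window with a single comparison.
-- outside the precondition, e.g. on search_left(-3, 0, -1, [-8, -9, -3], [6, 4]): A returns 0, B returns 0; on search_left(0, 5, 1, [4, 0, 0], [4, -8]): A returns 2, B returns 2
import Mathlib
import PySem

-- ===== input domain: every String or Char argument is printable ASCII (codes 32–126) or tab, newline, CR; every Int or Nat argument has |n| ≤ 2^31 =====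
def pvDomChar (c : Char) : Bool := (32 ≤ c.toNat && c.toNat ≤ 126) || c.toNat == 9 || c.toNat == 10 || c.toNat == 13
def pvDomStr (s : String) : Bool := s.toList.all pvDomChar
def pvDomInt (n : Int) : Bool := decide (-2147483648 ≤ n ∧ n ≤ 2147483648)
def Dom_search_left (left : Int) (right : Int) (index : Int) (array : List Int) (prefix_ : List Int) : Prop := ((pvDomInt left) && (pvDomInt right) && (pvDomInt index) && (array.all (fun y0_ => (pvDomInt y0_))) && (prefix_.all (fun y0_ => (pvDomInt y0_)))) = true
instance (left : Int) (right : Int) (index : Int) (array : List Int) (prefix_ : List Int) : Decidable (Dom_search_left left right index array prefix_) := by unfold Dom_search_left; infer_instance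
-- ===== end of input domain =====

-- B replaces A's recursive closed-window binary search by an iterative lo/width-window loop
-- with a side-split predicate helper (objective: alternative decomposition, same cost).

-- ===== PORT A =====
-- sum_in_between(i, j, prefix): prefix[r-1] - prefix[l] with Python indexing (none = IndexError)
def pvSumInBetween (i j : Int) (p : List Int) : Option Int :=
  let l := min i j
  let r := max i j
  match PySem.List.pyGet? p (r - 1), PySem.List.pyGet? p l with
  | some x, some y => some (x - y)
  | _, _ => none

-- A's recursion, step for step, on fuel (none = exception or fuel exhausted; the fuel
-- passed below suffices for every input Pre_ admits)
def searchLeftFuel : Nat → Int → Int → Int → List Int → List Int → Option Int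
  | 0, _, _, _, _, _ => none
  | Nat.succ f, left, right, index, array, p =>
    let mid := PySem.Int.floordiv (left + right) 2
    if right = left then some right
    else
      let general : Option Int :=
        match pvSumInBetween index mid p, PySem.List.pyGet? array index with
        | some s, some a =>
          if s ≤ a then searchLeftFuel f left mid index array p
          else searchLeftFuel f (mid + 1) right index array p
        | _, _ => none
      if right = left + 1 then
        match pvSumInBetween right index p, PySem.List.pyGet? array index with
        | some s1, some a =>
          if s1 ≤ a then
            match pvSumInBetween left index p, PySem.List.pyGet? array index with
            | some s2, some a2 => if s2 ≤ a2 then some left else some right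
            | _, _ => none
          else general
        | _, _ => none
      else general

def search_left (left : Int) (right : Int) (index : Int) (array : List Int) (prefix_ : List Int) : Option Int :=
  searchLeftFuel ((right - left).toNat + 2) left right index array prefix_

-- ===== PORT B =====
-- B's predicate ok(j): the in-between prefix difference on the relevant side is ≤ a (none = IndexError)
def pvOk (index : Int) (p : List Int) (a j : Int) : Option Bool :=
  if j ≥ index then
    match PySem.List.pyGet? p (j - 1), PySem.List.pyGet? p index with
    | some x, some y => some (decide (x - y ≤ a))
    | _, _ => none
  else
    match PySem.List.pyGet? p (index - 1), PySem.List.pyGet? p j with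
    | some x, some y => some (decide (x - y ≤ a))
    | _, _ => none

-- midpoint bounds used only for B's termination measure
theorem pv_half_bounds {w : Int} (h : w > 1) :
    1 ≤ PySem.Int.floordiv w 2 ∧ 2 * PySem.Int.floordiv w 2 ≤ w ∧ w ≤ 2 * PySem.Int.floordiv w 2 + 1 := by
  rw [PySem.Int.floordiv_eq_ediv_of_pos (by norm_num)]
  omega

-- B's while-loop over the mutable pair (lo, width)
def searchLoop (index : Int) (p : List Int) (a : Int) (lo : Int) (width : Int) : Option Int :=
  if h : width > 1 then
    match pvOk index p a (lo + PySem.Int.floordiv width 2) with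
    | none => none
    | some true => searchLoop index p a lo (PySem.Int.floordiv width 2)
    | some false => searchLoop index p a (lo + PySem.Int.floordiv width 2 + 1) (width - PySem.Int.floordiv width 2 - 1)
  else if width = 1 then
    match pvOk index p a lo with
    | none => none
    | some b => if b then some lo else some (lo + 1)
  else some lo
termination_by width.toNat
decreasing_by
  · have := pv_half_bounds h; omega
  · have := pv_half_bounds h; omega

def search_left_alt (left : Int) (right : Int) (index : Int) (array : List Int) (prefix_ : List Int) : Option Int :=
  if right = left then some right
  else
    match PySem.List.pyGet? array index with
    | none => none
    | some a => searchLoop index prefix_ a left (right - left)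

-- ===== PRECONDITION & SPEC =====
-- Pre_ admits the degenerate window right == left (immediate return, no access) and every
-- window left ≤ right on which index and every prefix position the search could touch are valid
-- Python indices (possibly negative, with wraparound); outside it A recurses without bound
-- (right < left), raises IndexError, or — when the probed midpoints happen to avoid the
-- out-of-range positions — still returns, with B agreeing there (see the excluded examples).
def Pre_search_left (left : Int) (right : Int) (index : Int) (array : List Int) (prefix_ : List Int) : Prop :=
  right = left ∨
  (left ≤ right ∧ -(array.length : Int) ≤ index ∧ index < array.length ∧
   -(prefix_.length : Int) ≤ min index left ∧ min index right < prefix_.length ∧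
   -(prefix_.length : Int) ≤ max index left - 1 ∧ max index right - 1 < prefix_.length)
instance (left : Int) (right : Int) (index : Int) (array : List Int) (prefix_ : List Int) : Decidable (Pre_search_left left right index array prefix_) := by unfold Pre_search_left; infer_instance

def pvWitness_search_left : Int × Int × Int × List Int × List Int := (0, 2, 0, [5], [0, 1])

def Spec_search_left (left : Int) (right : Int) (index : Int) (array : List Int) (prefix_ : List Int) (out : Option Int) : Prop := out = search_left_alt left right index array prefix_
instance (left : Int) (right : Int) (index : Int) (array : List Int) (prefix_ : List Int) (out : Option Int) : Decidable (Spec_search_left left right index array prefix_ out) := by unfold Spec_search_left; infer_instance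

-- ===== CLAIM (what is proved, stated in full; the proofs are below) =====
def Claim_equal_search_left : Prop := ∀ (left : Int) (right : Int) (index : Int) (array : List Int) (prefix_ : List Int), Dom_search_left left right index array prefix_ → Pre_search_left left right index array prefix_ → Spec_search_left left right index array prefix_ (search_left left right index array prefix_)

-- ===== LEMMAS AND PROOFS =====

-- In-range Python indexing returns a value
theorem pvGet_isSome {xs : List Int} {i : Int} (h1 : -(xs.length : Int) ≤ i) (h2 : i < xs.length) :
    ∃ v, PySem.List.pyGet? xs i = some v := by
  cases hv : PySem.List.pyGet? xs i with
  | some v => exact ⟨v, rfl⟩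
  | none =>
    rw [PySem.List.pyGet?_eq_none_iff] at hv
    exact absurd ⟨h1, h2⟩ hv

-- sum_in_between returns a value once both its accesses are valid Python indices
-- (in both argument orders, with the same result)
theorem pvSum_isSome {p : List Int} {i j : Int}
    (h1 : -(p.length : Int) ≤ max i j - 1) (h2 : max i j - 1 < p.length)
    (h3 : -(p.length : Int) ≤ min i j) (h4 : min i j < p.length) :
    ∃ v, pvSumInBetween i j p = some v ∧ pvSumInBetween j i p = some v := by
  obtain ⟨x, hx⟩ := pvGet_isSome (xs := p) (i := max i j - 1) h1 h2
  obtain ⟨y, hy⟩ := pvGet_isSome (xs := p) (i := min i j) h3 h4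
  refine ⟨x - y, ?_, ?_⟩
  · simp only [pvSumInBetween]
    rw [hx, hy]
  · simp only [pvSumInBetween, min_comm j i, max_comm j i]
    rw [hx, hy]

-- B's predicate agrees with A's sum: ok(j) decides sum_in_between(index,j) ≤ a
theorem pvOk_eq {index j : Int} {p : List Int} {a v : Int}
    (h : pvSumInBetween index j p = some v) :
    pvOk index p a j = some (decide (v ≤ a)) := by
  by_cases hj : index ≤ j
  · simp only [pvSumInBetween, max_eq_right hj, min_eq_left hj] at h
    simp only [pvOk, ge_iff_le, if_pos hj]
    cases hx : PySem.List.pyGet? p (j - 1) <;> cases hy : PySem.List.pyGet? p index <;>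
      rw [hx, hy] at h <;> simp_all
  · have hj' : j ≤ index := by omega
    simp only [pvSumInBetween, max_eq_left hj', min_eq_right hj'] at h
    simp only [pvOk, ge_iff_le, if_neg hj]
    cases hx : PySem.List.pyGet? p (index - 1) <;> cases hy : PySem.List.pyGet? p j <;>
      rw [hx, hy] at h <;> simp_all

-- the closed-window midpoint equals lo + width // 2
theorem pv_mid_shift (l r : Int) :
    PySem.Int.floordiv (l + r) 2 = l + PySem.Int.floordiv (r - l) 2 := by
  rw [PySem.Int.floordiv_eq_ediv_of_pos (by norm_num),
    PySem.Int.floordiv_eq_ediv_of_pos (by norm_num)]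
  omega

-- one-step unfolding of A's recursion (the shared tail 'general' written out twice)
theorem pvFuelA_succ (f : Nat) (l r i : Int) (ar p : List Int) :
    searchLeftFuel (f + 1) l r i ar p =
      (if r = l then some r
       else if r = l + 1 then
         match pvSumInBetween r i p, PySem.List.pyGet? ar i with
         | some s1, some a =>
           if s1 ≤ a then
             match pvSumInBetween l i p, PySem.List.pyGet? ar i with
             | some s2, some a2 => if s2 ≤ a2 then some l else some r
             | _, _ => none
           else
             match pvSumInBetween i (PySem.Int.floordiv (l + r) 2) p, PySem.List.pyGet? ar i with
             | some s, some a =>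
               if s ≤ a then searchLeftFuel f l (PySem.Int.floordiv (l + r) 2) i ar p
               else searchLeftFuel f (PySem.Int.floordiv (l + r) 2 + 1) r i ar p
             | _, _ => none
         | _, _ => none
       else
         match pvSumInBetween i (PySem.Int.floordiv (l + r) 2) p, PySem.List.pyGet? ar i with
         | some s, some a =>
           if s ≤ a then searchLeftFuel f l (PySem.Int.floordiv (l + r) 2) i ar p
           else searchLeftFuel f (PySem.Int.floordiv (l + r) 2 + 1) r i ar p
         | _, _ => none) := rfl

theorem searchLeftFuel_self (f : Nat) (l index : Int) (array p : List Int) :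
    searchLeftFuel (f + 1) l l index array p = some l := by
  rw [pvFuelA_succ, if_pos rfl]

theorem pv_key (n : Nat) : ∀ (left right index : Int) (array p : List Int) (a : Int),
    PySem.List.pyGet? array index = some a →
    left ≤ right →
    -(p.length : Int) ≤ min index left → min index right < p.length →
    -(p.length : Int) ≤ max index left - 1 → max index right - 1 < p.length →
    (right - left).toNat ≤ n →
    searchLeftFuel (n + 2) left right index array p = searchLoop index p a left (right - left) := by
  induction n with
  | zero =>
    intro left right index array p a ha hlr hm1 hm2 hm3 hm4 hw
    have h : right = left := by omega
    subst h
    rw [show (0 + 2 : Nat) = 1 + 1 from rfl, searchLeftFuel_self, searchLoop]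
    norm_num
  | succ m ih =>
    intro left right index array p a ha hlr hm1 hm2 hm3 hm4 hw
    by_cases h0 : right = left
    · subst h0
      rw [show (m + 1 + 2 : Nat) = (m + 2) + 1 from rfl, searchLeftFuel_self, searchLoop]
      norm_num
    rw [show (m + 1 + 2 : Nat) = (m + 2) + 1 from rfl, pvFuelA_succ, if_neg h0]
    by_cases h1 : right = left + 1
    · subst h1
      have hmid : PySem.Int.floordiv (left + (left + 1)) 2 = left := by
        rw [PySem.Int.floordiv_eq_iff_of_pos (by norm_num)]
        constructor <;> omega
      obtain ⟨v1, hv1, hv1s⟩ := pvSum_isSome (p := p) (i := index) (j := left + 1)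
        (by omega) (by omega) (by omega) (by omega)
      obtain ⟨v2, hv2, hv2s⟩ := pvSum_isSome (p := p) (i := index) (j := left)
        (by omega) (by omega) (by omega) (by omega)
      rw [if_pos rfl, hmid, hv1s, hv2s, hv2, ha,
        show (m + 2 : Nat) = (m + 1) + 1 from rfl, searchLeftFuel_self, searchLeftFuel_self]
      rw [searchLoop, show left + 1 - left = (1 : Int) from by omega]
      rw [dif_neg (by norm_num : ¬ ((1 : Int) > 1)), if_pos rfl, pvOk_eq (a := a) hv2]
      by_cases hc2 : v2 ≤ a <;> by_cases hc1 : v1 ≤ a <;> simp [hc1, hc2]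
    · -- width ≥ 2
      have hw2 : left + 2 ≤ right := by omega
      have hhb := pv_half_bounds (w := right - left) (by omega)
      have hms := pv_mid_shift left right
      set half := PySem.Int.floordiv (right - left) 2 with hhalf
      have hmid : PySem.Int.floordiv (left + right) 2 = left + half := hms
      obtain ⟨v, hv, hvs⟩ := pvSum_isSome (p := p) (i := index) (j := left + half)
        (by omega) (by omega) (by omega) (by omega)
      rw [if_neg h1, hmid, hv, ha, searchLoop]
      rw [dif_pos (by omega : right - left > 1), ← hhalf]
      by_cases hc : v ≤ a
      · have hd : pvOk index p a (left + half) = some true := by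
          rw [pvOk_eq (a := a) hv]; simp [hc]
        simp only [hd]
        rw [if_pos hc]
        have heq := ih left (left + half) index array p a ha (by omega)
          (by omega) (by omega) (by omega) (by omega) (by omega)
        rw [show left + half - left = half from by omega] at heq
        exact heq
      · have hd : pvOk index p a (left + half) = some false := by
          rw [pvOk_eq (a := a) hv]; simp [hc]
        simp only [hd]
        rw [if_neg hc]
        by_cases hz : left + half + 1 = right
        · rw [show right - left - half - 1 = (0 : Int) from by omega, hz,
            show (m + 2 : Nat) = (m + 1) + 1 from rfl, searchLeftFuel_self, searchLoop]
          norm_num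
        · have heq := ih (left + half + 1) right index array p a ha (by omega)
            (by omega) (by omega) (by omega) (by omega) (by omega)
          rw [show right - (left + half + 1) = right - left - half - 1 from by omega] at heq
          exact heq

-- ===== VERDICT (by name: the statement is the Claim_ definition above) =====
theorem search_left_spec : Claim_equal_search_left := by
  intro left right index array prefix_ _hdom hpre
  unfold Spec_search_left search_left search_left_alt
  by_cases h0 : right = left
  · subst h0
    rw [show (right - right).toNat + 2 = 1 + 1 from by omega, searchLeftFuel_self, if_pos rfl]
  · rcases hpre with h | ⟨hlr, hia0, hia, hm1, hm2, hm3, hm4⟩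
    · exact absurd h h0
    · obtain ⟨a, ha⟩ := pvGet_isSome (xs := array) (i := index) hia0 hia
      rw [if_neg h0, ha]
      exact pv_key ((right - left).toNat) left right index array prefix_ a
        ha hlr hm1 hm2 hm3 hm4 (le_refl _)
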